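-- pv_equiv track=rewrite | github.com/evenwebb/tesla-owners-club-uk-events-calendar | tocuk_scraper.py | escape_and_fold_ical_text
-- ===== SOURCE A (Python) =====
-- ICAL_LINE_LENGTH = 75
--
-- def escape_ical_text(text: str) -> str:
--     """RFC 5545 TEXT value escaping (backslash, newline, semicolon, comma)."""
--     if not text:
--         return ""
--     return (
--         text.replace("\\", "\\\\")
--         .replace("\n", "\\n")
--         .replace(";", "\\;")
--         .replace(",", "\\,")
--     )
--
-- def escape_and_fold_ical_text(text: str, prefix: str = "") -> str:
--     """Escape and fold text for iCalendar format per RFC 5545."""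
--     escaped = escape_ical_text(text)
--     full_line = prefix + escaped
--
--     if len(full_line) <= ICAL_LINE_LENGTH:
--         return full_line
--
--     result = [full_line[:ICAL_LINE_LENGTH]]
--     remaining = full_line[ICAL_LINE_LENGTH:]
--     while remaining:
--         result.append(" " + remaining[: ICAL_LINE_LENGTH - 1])
--         remaining = remaining[ICAL_LINE_LENGTH - 1 :]
--     return "\n".join(result)
-- ===== SOURCE B (Python) =====
-- ICAL_LINE_LENGTH = 75
--
--
-- def _esc_char(c: str) -> str:
--     if c == "\\":
--         return "\\\\"
--     if c == "\n":
--         return "\\n"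
--     if c == ";":
--         return "\\;"
--     if c == ",":
--         return "\\,"
--     return c
--
--
-- def escape_and_fold_ical_text(text: str, prefix: str = "") -> str:
--     """Escape per character and fold in a single pass over the characters."""
--     stream = list(prefix)
--     for c in text:
--         stream.extend(_esc_char(c))
--     if len(stream) <= ICAL_LINE_LENGTH:
--         return "".join(stream)
--     lines = []
--     cur = []
--     for c in stream:
--         if len(cur) == ICAL_LINE_LENGTH:
--             lines.append(cur)
--             cur = [" "]
--         cur.append(c)
--     lines.append(cur)
--     return "\n".join("".join(l) for l in lines)
-- ===== Notes on version B (the rewrite author's own statement) =====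
-- stated objective: alternative
-- what changed: Replaces the four whole-string .replace passes by a single per-character escape map, and the slice-and-chunk folding loop by one pass over the characters that flushes the current physical line when it reaches 75 characters and seeds continuations with a leading space.
import Mathlib
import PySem

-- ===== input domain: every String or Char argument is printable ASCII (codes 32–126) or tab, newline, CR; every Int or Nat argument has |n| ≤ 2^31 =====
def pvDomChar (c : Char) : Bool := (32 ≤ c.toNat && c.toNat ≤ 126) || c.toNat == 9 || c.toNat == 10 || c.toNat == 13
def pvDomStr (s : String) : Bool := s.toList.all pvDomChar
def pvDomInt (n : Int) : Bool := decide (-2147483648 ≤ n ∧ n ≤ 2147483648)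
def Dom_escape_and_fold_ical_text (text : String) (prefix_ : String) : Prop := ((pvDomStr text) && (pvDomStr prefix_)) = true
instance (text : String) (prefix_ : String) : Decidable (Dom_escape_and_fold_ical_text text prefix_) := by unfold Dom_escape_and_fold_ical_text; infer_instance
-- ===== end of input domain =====

-- B escapes character by character and folds in one pass instead of four whole-string .replace passes and a slice-chunking loop; same cost, different decomposition ("alternative").

-- ===== PORT A =====
-- ICAL_LINE_LENGTH = 75 appears as the literal 75 (74 = ICAL_LINE_LENGTH - 1); A's local full_line is inlined
def escape_ical_text (text : String) : String :=
  if text = "" then ""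
  else PySem.Str.replace (PySem.Str.replace (PySem.Str.replace
         (PySem.Str.replace text "\\" "\\\\") "\n" "\\n") ";" "\\;") "," "\\,"

-- the 'while remaining:' loop of A
def foldLoopA (result : List String) (remaining : String) : List String :=
  if remaining = "" then result
  else foldLoopA (result ++ [" " ++ PySem.Str.slice remaining none (some 74)])
                 (PySem.Str.slice remaining (some 74) none)
termination_by remaining.toList.length
decreasing_by
  have hd : (PySem.Str.slice remaining (some 74) none).toList = remaining.toList.drop 74 := by
    simp [pysem]
  rw [hd, List.length_drop]
  have hne : remaining.toList ≠ [] := by simp_all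
  have := List.length_pos_iff.mpr hne
  omega

def escape_and_fold_ical_text (text : String) (prefix_ : String) : String :=
  if PySem.Str.len (prefix_ ++ escape_ical_text text) ≤ 75 then prefix_ ++ escape_ical_text text
  else
    PySem.Str.join "\n"
      (foldLoopA [PySem.Str.slice (prefix_ ++ escape_ical_text text) none (some 75)]
                 (PySem.Str.slice (prefix_ ++ escape_ical_text text) (some 75) none))

-- ===== PORT B =====
-- _esc_char: the per-character escape map (its 1- or 2-char result string, as a character list)
def pvEsc (c : Char) : List Char :=
  if c = '\\' then ['\\', '\\']
  else if c = '\n' then ['\\', 'n']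
  else if c = ';' then ['\\', ';']
  else if c = ',' then ['\\', ',']
  else [c]

-- B's escape loop: stream = list(prefix); for c in text: stream.extend(_esc_char(c))
def pvStream (text : String) (prefix_ : String) : List Char :=
  text.toList.foldl (fun acc c => acc ++ pvEsc c) prefix_.toList

-- body of B's folding loop: flush the full 75-char line, start a continuation with a space
def pvFoldStep (s : List (List Char) × List Char) (c : Char) : List (List Char) × List Char :=
  if s.2.length == 75 then (s.1 ++ [s.2], [' ', c]) else (s.1, s.2 ++ [c])

-- B's folding loop plus the final lines.append(cur)
def pvFoldLines (stream : List Char) : List (List Char) :=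
  (stream.foldl pvFoldStep ([], [])).1 ++ [(stream.foldl pvFoldStep ([], [])).2]

def escape_and_fold_ical_text_alt (text : String) (prefix_ : String) : String :=
  if (pvStream text prefix_).length ≤ 75 then String.ofList (pvStream text prefix_)
  else String.ofList (PySem.Chars.join ['\n'] (pvFoldLines (pvStream text prefix_)))

-- ===== PRECONDITION & SPEC =====
def Spec_escape_and_fold_ical_text (text : String) (prefix_ : String) (out : String) : Prop := out = escape_and_fold_ical_text_alt text prefix_
instance (text : String) (prefix_ : String) (out : String) : Decidable (Spec_escape_and_fold_ical_text text prefix_ out) := by unfold Spec_escape_and_fold_ical_text; infer_instance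

-- ===== CLAIM (what is proved, stated in full; the proofs are below) =====
def Claim_equal_escape_and_fold_ical_text : Prop := ∀ (text : String) (prefix_ : String), Dom_escape_and_fold_ical_text text prefix_ → Spec_escape_and_fold_ical_text text prefix_ (escape_and_fold_ical_text text prefix_)

-- ===== LEMMAS AND PROOFS =====

-- replace with a single-character pattern is a flatMap
theorem replace_go_single (c : Char) (new : List Char) :
    ∀ (fuel : Nat) (l acc : List Char), l.length ≤ fuel →
      PySem.Chars.replace.go [c] new fuel l acc
        = acc.reverse ++ l.flatMap (fun x => if x = c then new else [x]) := by
  intro fuel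
  induction fuel with
  | zero =>
    intro l acc h
    have : l = [] := List.length_eq_zero_iff.mp (Nat.le_zero.mp h)
    subst this; simp [PySem.Chars.replace.go]
  | succ n ih =>
    intro l acc h
    cases l with
    | nil => simp [PySem.Chars.replace.go]
    | cons x t =>
      simp only [PySem.Chars.replace.go]
      by_cases hx : x = c
      · subst hx
        have hpre : List.isPrefixOf [x] (x :: t) = true := by
          simp [List.isPrefixOf]
        rw [if_pos hpre]
        simp only [List.length_cons] at h
        rw [ih _ _ (by simpa using Nat.le_of_succ_le_succ h)]
        simp
      · have hpre : List.isPrefixOf [c] (x :: t) = false := by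
          simp [List.isPrefixOf]; exact fun hh => absurd hh.symm hx
        rw [if_neg (by simp [hpre])]
        rw [ih _ _ (by simpa using Nat.le_of_succ_le_succ h)]
        simp [hx]

theorem replace_single (cs : List Char) (c : Char) (new : List Char) :
    PySem.Chars.replace cs [c] new = cs.flatMap (fun x => if x = c then new else [x]) := by
  simp only [PySem.Chars.replace, List.isEmpty]
  rw [if_neg (by simp)]
  simpa using replace_go_single c new cs.length cs [] (le_refl _)

-- A's escape chain equals B's per-character escape
theorem escape_toList (t : String) :
    (escape_ical_text t).toList = t.toList.flatMap pvEsc := by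
  unfold escape_ical_text
  by_cases h : t = ""
  · subst h; simp
  · rw [if_neg h]
    simp only [PySem.Str.toList_replace]
    have h1 : ("\\" : String).toList = ['\\'] := by decide
    have h2 : ("\n" : String).toList = ['\n'] := by decide
    have h3 : ((";" : String)).toList = [';'] := by decide
    have h4 : (("," : String)).toList = [','] := by decide
    have h5 : ("\\\\" : String).toList = ['\\', '\\'] := by decide
    have h6 : ("\\n" : String).toList = ['\\', 'n'] := by decide
    have h7 : ("\\;" : String).toList = ['\\', ';'] := by decide
    have h8 : ("\\," : String).toList = ['\\', ','] := by decide
    rw [h1, h2, h3, h4, h5, h6, h7, h8]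
    rw [replace_single, replace_single, replace_single, replace_single]
    rw [List.flatMap_assoc, List.flatMap_assoc, List.flatMap_assoc]
    apply List.flatMap_congr
    intro x _
    by_cases hb : x = '\\'
    · subst hb; decide
    · by_cases hn : x = '\n'
      · subst hn; decide
      · by_cases hs : x = ';'
        · subst hs; decide
        · by_cases hc : x = ','
          · subst hc; decide
          · simp [pvEsc, hb, hn, hs, hc]

theorem pvStream_eq (text prefix_ : String) :
    pvStream text prefix_ = (prefix_ ++ escape_ical_text text).toList := by
  unfold pvStream
  rw [PySem.List.foldl_append_eq_flatMap]
  simp [escape_toList]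

-- A's chunking of the remainder (74 data chars per continuation line, leading space)
def chunksA (cs : List Char) : List (List Char) :=
  if cs = [] then [] else (' ' :: cs.take 74) :: chunksA (cs.drop 74)
termination_by cs.length
decreasing_by
  have : 0 < cs.length := List.length_pos_iff.mpr (by assumption)
  simp; omega

theorem chunksA_nil : chunksA [] = [] := by rw [chunksA]; simp

-- what B's one-pass fold produces from a partially filled current line and the rest
def mergeChunks (cur rem : List Char) : List (List Char) :=
  if rem.length ≤ 75 - cur.length then [cur ++ rem]
  else (cur ++ rem.take (75 - cur.length)) :: chunksA (rem.drop (75 - cur.length))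

theorem chunksA_cons (c : Char) (rest : List Char) :
    chunksA (c :: rest) = mergeChunks [' ', c] rest := by
  rw [chunksA, if_neg (List.cons_ne_nil _ _)]
  rw [show (74 : Nat) = 73 + 1 from rfl, List.take_succ_cons, List.drop_succ_cons]
  rw [mergeChunks]
  rw [show (75 : Nat) - ([' ', c] : List Char).length = 73 from rfl]
  by_cases h : rest.length ≤ 73
  · rw [if_pos h, List.take_of_length_le h, List.drop_of_length_le h, chunksA_nil]
    simp
  · rw [if_neg h]
    simp

theorem mergeChunks_full (cur : List Char) (c : Char) (rest : List Char)
    (h : cur.length = 75) :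
    mergeChunks cur (c :: rest) = cur :: mergeChunks [' ', c] rest := by
  rw [mergeChunks, h]
  simp only [Nat.sub_self, List.take_zero, List.append_nil, List.drop_zero]
  rw [if_neg (by simp)]
  rw [chunksA_cons]

theorem mergeChunks_step (cur : List Char) (c : Char) (rest : List Char)
    (h : cur.length < 75) :
    mergeChunks cur (c :: rest) = mergeChunks (cur ++ [c]) rest := by
  rw [mergeChunks, mergeChunks]
  simp only [List.length_cons, List.length_append, List.length_cons, List.length_nil]
  by_cases hr : rest.length + 1 ≤ 75 - cur.length
  · rw [if_pos hr, if_pos (by omega)]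
    simp
  · rw [if_neg hr, if_neg (by omega)]
    have h75 : 75 - cur.length = (75 - (cur.length + 1)) + 1 := by omega
    rw [h75, List.take_succ_cons, List.drop_succ_cons]
    simp

-- B's fold loop computes mergeChunks
theorem foldB (rem : List Char) :
    ∀ (lines : List (List Char)) (cur : List Char), cur.length ≤ 75 →
      (rem.foldl pvFoldStep (lines, cur)).1 ++ [(rem.foldl pvFoldStep (lines, cur)).2]
        = lines ++ mergeChunks cur rem := by
  induction rem with
  | nil =>
    intro lines cur h
    simp [mergeChunks]
  | cons c rest ih =>
    intro lines cur h
    simp only [List.foldl_cons]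
    by_cases hc : cur.length = 75
    · rw [show pvFoldStep (lines, cur) c = (lines ++ [cur], [' ', c]) by
        simp [pvFoldStep, hc]]
      rw [ih _ _ (by simp)]
      rw [mergeChunks_full cur c rest hc]
      simp
    · rw [show pvFoldStep (lines, cur) c = (lines, cur ++ [c]) by
        simp [pvFoldStep, hc]]
      rw [ih _ _ (by simp; omega)]
      rw [mergeChunks_step cur c rest (by omega)]

-- A's slice loop computes chunksA
theorem loopA_map :
    ∀ (n : Nat) (remaining : String), remaining.toList.length ≤ n →
      ∀ (result : List String),
        (foldLoopA result remaining).map String.toList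
          = result.map String.toList ++ chunksA remaining.toList := by
  intro n
  induction n with
  | zero =>
    intro r h result
    have hnil : r.toList = [] := by simpa using h
    have hr : r = "" := by
      have := congrArg String.ofList hnil; simpa using this
    rw [foldLoopA.eq_def, if_pos hr, hnil, chunksA_nil]
    simp
  | succ n ih =>
    intro r h result
    by_cases hr : r = ""
    · rw [foldLoopA.eq_def, if_pos hr]
      subst hr
      rw [show ("" : String).toList = [] from by decide, chunksA_nil]
      simp
    · rw [foldLoopA.eq_def, if_neg hr]
      have hne : r.toList ≠ [] := by simp_all
      have hpos : 0 < r.toList.length := List.length_pos_iff.mpr hne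
      have hdrop : (PySem.Str.slice r (some 74) none).toList = r.toList.drop 74 := by
        simp [pysem]
      rw [ih _ (by rw [hdrop, List.length_drop]; omega)]
      rw [hdrop]
      conv_rhs => rw [chunksA]
      rw [if_neg hne]
      have hsp : (" " : String).toList = [' '] := by decide
      have htake : (" " ++ PySem.Str.slice r none (some 74)).toList
          = ' ' :: r.toList.take 74 := by
        simp [pysem, hsp]
      simp [htake]

theorem join_ofList (L : List String) :
    PySem.Str.join "\n" L = String.ofList (PySem.Chars.join ['\n'] (L.map String.toList)) := by
  have h := PySem.Str.toList_join "\n" L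
  have hnl : ("\n" : String).toList = ['\n'] := by decide
  rw [hnl] at h
  rw [← h, String.ofList_toList]

theorem spec_main (text prefix_ : String) :
    escape_and_fold_ical_text text prefix_ = escape_and_fold_ical_text_alt text prefix_ := by
  unfold escape_and_fold_ical_text escape_and_fold_ical_text_alt
  rw [pvStream_eq]
  by_cases hle : (prefix_ ++ escape_ical_text text).toList.length ≤ 75
  · rw [if_pos hle, if_pos (by rw [PySem.Str.len_eq]; exact_mod_cast hle)]
    simp
  · rw [if_neg hle, if_neg (by rw [PySem.Str.len_eq]; omega)]
    unfold pvFoldLines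
    rw [foldB _ [] [] (by simp)]
    have hmc : mergeChunks [] (prefix_ ++ escape_ical_text text).toList
        = (prefix_ ++ escape_ical_text text).toList.take 75
            :: chunksA ((prefix_ ++ escape_ical_text text).toList.drop 75) := by
      rw [mergeChunks, if_neg (by simpa using hle)]
      simp
    rw [hmc, join_ofList]
    rw [loopA_map (PySem.Str.slice (prefix_ ++ escape_ical_text text) (some 75) none).toList.length _
        (le_refl _) _]
    have hto75 : (PySem.Str.slice (prefix_ ++ escape_ical_text text) none (some 75)).toList
        = (prefix_ ++ escape_ical_text text).toList.take 75 := by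
      simp [pysem]
    have hfrom75 : (PySem.Str.slice (prefix_ ++ escape_ical_text text) (some 75) none).toList
        = (prefix_ ++ escape_ical_text text).toList.drop 75 := by
      simp [pysem]
    rw [hfrom75]
    simp [hto75]

-- ===== VERDICT (by name: the statement is the Claim_ definition above) =====
theorem escape_and_fold_ical_text_spec : Claim_equal_escape_and_fold_ical_text := by
  intro text prefix_ _
  unfold Spec_escape_and_fold_ical_text
  exact spec_main text prefix_
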